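-- pv_equiv track=rewrite | github.com/fcharles42/AST-Code-Generation-2 | eval/eval_phase2.py | indent_balance_ok
-- ===== SOURCE A (Python) =====
-- INDENT = "<indent>"
--
-- DEDENT = "<dedent>"
--
-- def indent_balance_ok(tokens):
--     """Checks block correctness: never negative depth, ends at depth 0."""
--     depth = 0
--     for t in tokens:
--         if t == INDENT:
--             depth += 1
--         elif t == DEDENT:
--             depth -= 1
--             if depth < 0:
--                 return False
--     return depth == 0
-- ===== SOURCE B (Python) =====
-- INDENT = "<indent>"
-- DEDENT = "<dedent>"
--
-- def indent_balance_ok(tokens):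
--     """Checks block correctness: never negative depth, ends at depth 0."""
--     opens = [i for i, t in enumerate(tokens) if t == INDENT]
--     closes = [i for i, t in enumerate(tokens) if t == DEDENT]
--     return len(opens) == len(closes) and all(o < c for o, c in zip(opens, closes))
-- ===== Notes on version B (the rewrite author's own statement) =====
-- stated objective: alternative
-- what changed: Replaces A's running-depth counter with the matching-pair characterization of balanced sequences: collect the index lists of INDENT and DEDENT occurrences and check equal counts plus that the k-th INDENT index precedes the k-th DEDENT index.
import Mathlib
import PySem

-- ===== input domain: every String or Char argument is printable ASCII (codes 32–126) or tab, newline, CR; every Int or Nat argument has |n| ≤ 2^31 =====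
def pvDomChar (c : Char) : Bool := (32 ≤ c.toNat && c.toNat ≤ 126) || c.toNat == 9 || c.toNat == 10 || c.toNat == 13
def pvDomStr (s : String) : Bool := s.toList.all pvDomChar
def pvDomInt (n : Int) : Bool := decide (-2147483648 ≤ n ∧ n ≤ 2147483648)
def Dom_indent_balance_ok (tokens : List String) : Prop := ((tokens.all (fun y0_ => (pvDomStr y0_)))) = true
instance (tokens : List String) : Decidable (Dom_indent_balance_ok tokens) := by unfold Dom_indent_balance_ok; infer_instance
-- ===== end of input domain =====

-- B replaces A's running-depth counter with the matching-pair characterization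
-- (k-th INDENT index precedes k-th DEDENT index, equal counts): alternative algorithm, same cost.

-- ===== PORT A =====
-- literal port of A's loop: depth accumulator, early `return False` on negative depth
def indentBalanceGo (tokens : List String) (depth : Int) : Bool :=
  match tokens with
  | [] => depth == 0
  | t :: ts =>
    if t = "<indent>" then indentBalanceGo ts (depth + 1)
    else if t = "<dedent>" then
      if depth - 1 < 0 then false else indentBalanceGo ts (depth - 1)
    else indentBalanceGo ts depth

def indent_balance_ok (tokens : List String) : Bool :=
  indentBalanceGo tokens 0

-- ===== PORT B =====
-- transliteration of the comprehension `[i for i, t in enumerate(tokens) if t == tgt]`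
def idxWhere (tgt : String) (i : Nat) : List String → List Nat
  | [] => []
  | t :: ts => if t = tgt then i :: idxWhere tgt (i + 1) ts else idxWhere tgt (i + 1) ts

def indent_balance_ok_alt (tokens : List String) : Bool :=
  let opens := idxWhere "<indent>" 0 tokens
  let closes := idxWhere "<dedent>" 0 tokens
  opens.length == closes.length && (opens.zip closes).all (fun p => decide (p.1 < p.2))

-- ===== PRECONDITION & SPEC =====
def Spec_indent_balance_ok (tokens : List String) (out : Bool) : Prop := out = indent_balance_ok_alt tokens
instance (tokens : List String) (out : Bool) : Decidable (Spec_indent_balance_ok tokens out) := by unfold Spec_indent_balance_ok; infer_instance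

-- ===== CLAIM (what is proved, stated in full; the proofs are below) =====
def Claim_equal_indent_balance_ok : Prop := ∀ (tokens : List String), Dom_indent_balance_ok tokens → Spec_indent_balance_ok tokens (indent_balance_ok tokens)

-- ===== LEMMAS AND PROOFS =====
theorem idxWhere_ge (tgt : String) (ts : List String) :
    ∀ (i : Nat), ∀ x ∈ idxWhere tgt i ts, i ≤ x := by
  induction ts with
  | nil => intro i x hx; simp [idxWhere] at hx
  | cons t ts ih =>
    intro i x hx
    by_cases h : t = tgt
    · simp [idxWhere, h] at hx
      rcases hx with rfl | hx
      · exact le_rfl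
      · exact Nat.le_of_succ_le (ih (i + 1) x hx)
    · simp [idxWhere, h] at hx
      exact Nat.le_of_succ_le (ih (i + 1) x hx)

-- invariant: A's loop from depth n equals the pairing criterion with the first n
-- DEDENT indices unconstrained (they close the n pending blocks)
theorem indentBalanceGo_eq (ts : List String) :
    ∀ (i n : Nat),
      indentBalanceGo ts (n : Int) =
        (((idxWhere "<dedent>" i ts).length == (idxWhere "<indent>" i ts).length + n) &&
          ((idxWhere "<indent>" i ts).zip ((idxWhere "<dedent>" i ts).drop n)).all
            (fun p => decide (p.1 < p.2))) := by
  have hne : ("<indent>" : String) ≠ "<dedent>" := by decide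
  induction ts with
  | nil =>
    intro i n
    cases n with
    | zero => simp [indentBalanceGo, idxWhere]
    | succ m =>
      simp only [indentBalanceGo, idxWhere, List.length_nil, List.zip_nil_left, List.all_nil,
        Bool.and_true]
      rw [Bool.eq_iff_iff]
      simp only [beq_iff_eq]
      omega
  | cons t ts ih =>
    intro i n
    by_cases hI : t = "<indent>"
    · subst hI
      rw [show indentBalanceGo ("<indent>" :: ts) (n : Int) = indentBalanceGo ts ((n : Int) + 1) by
        simp [indentBalanceGo]]
      rw [show ((n : Int) + 1) = ((n + 1 : Nat) : Int) by push_cast; ring]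
      rw [ih (i + 1) (n + 1)]
      simp only [idxWhere, reduceIte, if_neg hne]
      set O := idxWhere "<indent>" (i + 1) ts with hO
      set C := idxWhere "<dedent>" (i + 1) ts with hC
      by_cases hlen : C.length = O.length + n + 1
      · have hlt : n < C.length := by omega
        have hdrop : C.drop n = C[n] :: C.drop (n + 1) := List.drop_eq_getElem_cons hlt
        have hic : i < C[n] := by
          have : i + 1 ≤ C[n] := idxWhere_ge "<dedent>" ts (i + 1) C[n] (List.getElem_mem hlt)
          omega
        have h1 : (C.length == O.length + (n + 1)) = true := by simp; omega
        have h2 : (C.length == O.length + 1 + n) = true := by simp; omega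
        rw [hdrop]
        simp only [List.zip_cons_cons, List.all_cons, List.length_cons, h1, h2]
        simp [hic]
      · have h1 : (C.length == O.length + (n + 1)) = false := by simp; omega
        have h2 : (C.length == (i :: O).length + n) = false := by simp; omega
        rw [h1, h2]
        simp
    · by_cases hD : t = "<dedent>"
      · subst hD
        simp only [idxWhere, reduceIte, if_neg (Ne.symm hne)]
        set O := idxWhere "<indent>" (i + 1) ts with hO
        set C := idxWhere "<dedent>" (i + 1) ts with hC
        cases n with
        | zero =>
          rw [show indentBalanceGo ("<dedent>" :: ts) ((0 : Nat) : Int) = false by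
            simp [indentBalanceGo, hne.symm]]
          cases hOc : O with
          | nil =>
            have : ((i :: C).length == ([] : List Nat).length + 0) = false := by simp
            rw [this]; simp
          | cons o os =>
            have hio : ¬ (o < i) := by
              have : i + 1 ≤ o := by
                apply idxWhere_ge "<indent>" ts (i + 1) o
                rw [← hC] at *
                have : o ∈ O := by rw [hOc]; exact List.mem_cons_self
                exact this
              omega
            simp [hio]
        | succ m =>
          rw [show indentBalanceGo ("<dedent>" :: ts) ((m + 1 : Nat) : Int)
                = indentBalanceGo ts ((m : Nat) : Int) by
            have h1 : ¬ (((m + 1 : Nat) : Int) - 1 < 0) := by push_cast; omega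
            have h2 : ((m + 1 : Nat) : Int) - 1 = ((m : Nat) : Int) := by push_cast; ring
            simp [indentBalanceGo, hne.symm]]
          rw [ih (i + 1) m]
          have hlen : ((i :: C).length == O.length + (m + 1)) = (C.length == O.length + m) := by
            rw [Bool.eq_iff_iff]
            simp only [beq_iff_eq, List.length_cons]
            omega
          have hdrop : (i :: C).drop (m + 1) = C.drop m := by simp
          rw [hlen, hdrop]
      · rw [show indentBalanceGo (t :: ts) (n : Int) = indentBalanceGo ts (n : Int) by
          simp [indentBalanceGo, hI, hD]]
        simp only [idxWhere, if_neg hI, if_neg hD]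
        exact ih (i + 1) n

-- ===== VERDICT (by name: the statement is the Claim_ definition above) =====
theorem indent_balance_ok_spec : Claim_equal_indent_balance_ok := by
  intro tokens _
  unfold Spec_indent_balance_ok indent_balance_ok indent_balance_ok_alt
  rw [show ((0 : Int) = ((0 : Nat) : Int)) from rfl, indentBalanceGo_eq tokens 0 0]
  simp only [Nat.add_zero, List.drop_zero]
  congr 1
  rw [Bool.eq_iff_iff]
  simp only [beq_iff_eq]
  omega
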